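-- pv_equiv track=rewrite | github.com/chokandzhunusov/coding-problems | Strings/min_chars_for_words.py | min_chars_for_words
-- ===== SOURCE A (Python) =====
-- def min_chars_for_words(array: 'list[str]') -> 'list[str]':
--     result = []
--     hash = {}
--     for word in array:
--         hash_for_word = {}
--
--         # Count char frequencies per word.
--         for char in word:
--             if char not in hash_for_word:
--                 hash_for_word[char] = 0
--             hash_for_word[char] += 1
--
--         # Update the main hash if needed.
--         # Case when char found in word doesn't exist in main hash.
--         # Or the frequency is greater that it used to be in prev. words.
--         for char in hash_for_word:
--             if char in hash:
--                 hash[char] = max(hash[char], hash_for_word[char])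
--             else:
--                 hash[char] = hash_for_word[char]
--
--     # Make a list out of chars and their amounts.
--     for char in hash:
--         for k in range(hash[char]):
--             result.append(char)
--     return result
-- ===== SOURCE B (Python) =====
-- def min_chars_for_words(array: 'list[str]') -> 'list[str]':
--     # Ordered list of distinct chars by first appearance.
--     seen = set()
--     order = []
--     for word in array:
--         for ch in word:
--             if ch not in seen:
--                 seen.add(ch)
--                 order.append(ch)
--     # For each distinct char, re-scan the words for its max per-word count.
--     result = []
--     for ch in order:
--         need = 0
--         for word in array:
--             need = max(need, word.count(ch))
--         result += [ch] * need
--     return result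
-- ===== Notes on version B (the rewrite author's own statement) =====
-- stated objective: alternative
-- what changed: Replaces per-word frequency dicts merged into a running max-dict by a two-phase scheme: first collect distinct characters in first-appearance order with a seen-set, then for each such character re-scan all words with str.count to take the max, appending that many copies.
import Mathlib
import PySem

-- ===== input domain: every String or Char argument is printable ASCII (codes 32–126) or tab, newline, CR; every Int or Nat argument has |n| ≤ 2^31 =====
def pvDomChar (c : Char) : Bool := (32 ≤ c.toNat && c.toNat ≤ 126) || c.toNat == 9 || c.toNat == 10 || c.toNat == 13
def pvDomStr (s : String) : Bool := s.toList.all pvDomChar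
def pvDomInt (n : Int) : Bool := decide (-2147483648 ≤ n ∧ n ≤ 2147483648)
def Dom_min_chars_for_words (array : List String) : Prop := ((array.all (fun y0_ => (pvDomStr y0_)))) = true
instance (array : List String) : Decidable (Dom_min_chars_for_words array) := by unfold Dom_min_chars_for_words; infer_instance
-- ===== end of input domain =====

-- B collects the distinct characters in first-appearance order with a seen-set and
-- re-scans the words with count per character, instead of A's per-word dicts merged
-- into a running max-dict (alternative decomposition, not claimed faster).

-- ===== PORT A =====
def min_chars_for_words (array : List String) : List String :=
  let hash := array.foldl (fun hash word =>
    -- hash_for_word: count char frequencies per word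
    let hash_for_word := word.toList.foldl (fun d ch =>
      let d := if d.contains ch then d else d.insert ch 0
      d.insert ch (d.getD ch 0 + 1)) (PySem.Dict.empty : PySem.Dict Char Int)
    -- update the main hash if needed
    hash_for_word.items.foldl (fun h p =>
      if h.contains p.1 then h.insert p.1 (max (h.getD p.1 0) p.2)
      else h.insert p.1 p.2) hash) (PySem.Dict.empty : PySem.Dict Char Int)
  -- make a list out of chars and their amounts
  hash.items.foldl (fun r p =>
    (PySem.List.pyRange 0 p.2 1).foldl (fun r _ => r ++ [String.ofList [p.1]]) r) []

-- ===== PORT B =====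
def min_chars_for_words_alt (array : List String) : List String :=
  -- ordered list of distinct chars by first appearance (seen-set + order list)
  let st := array.foldl (fun st word =>
    word.toList.foldl (fun (st : PySem.Set Char × List Char) ch =>
      if ch ∈ st.1 then st else (PySem.Set.add st.1 ch, st.2 ++ [ch])) st)
    ((PySem.Set.empty : PySem.Set Char), ([] : List Char))
  -- for each distinct char, re-scan the words for its max per-word count
  st.2.foldl (fun r ch =>
    let need := array.foldl (fun m word => max m ((word.toList.count ch : Int))) 0
    r ++ PySem.List.pyRepeat [String.ofList [ch]] need) []

-- ===== PRECONDITION & SPEC =====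
def Spec_min_chars_for_words (array : List String) (out : List String) : Prop := out = min_chars_for_words_alt array
instance (array : List String) (out : List String) : Decidable (Spec_min_chars_for_words array out) := by unfold Spec_min_chars_for_words; infer_instance

-- ===== CLAIM (what is proved, stated in full; the proofs are below) =====
def Claim_equal_min_chars_for_words : Prop := ∀ (array : List String), Dom_min_chars_for_words array → Spec_min_chars_for_words array (min_chars_for_words array)

-- ===== LEMMAS AND PROOFS =====

-- A's processing of a single word (exactly the body of the outer fold of port A)
def pvStepWord (h : PySem.Dict Char Int) (word : String) : PySem.Dict Char Int :=
  let hash_for_word := word.toList.foldl (fun d ch =>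
    let d := if d.contains ch then d else d.insert ch 0
    d.insert ch (d.getD ch 0 + 1)) (PySem.Dict.empty : PySem.Dict Char Int)
  hash_for_word.items.foldl (fun h p =>
    if h.contains p.1 then h.insert p.1 (max (h.getD p.1 0) p.2)
    else h.insert p.1 p.2) h

-- the per-word counting loop builds Counter(word)
theorem pvHfw_eq_counter (l : List Char) :
    l.foldl (fun d ch =>
      let d := if d.contains ch then d else d.insert ch 0
      d.insert ch (d.getD ch 0 + 1)) (PySem.Dict.empty : PySem.Dict Char Int)
    = PySem.Dict.counter l := by
  have hstep : (fun (d : PySem.Dict Char Int) ch =>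
      let d := if d.contains ch then d else d.insert ch 0
      d.insert ch (d.getD ch 0 + 1))
      = fun d x => d.insert x (d.getD x 0 + 1) := by
    funext d ch
    by_cases h : d.contains ch
    · simp [h]
    · simp only [h, Bool.false_eq_true, if_false]
      rw [PySem.Dict.getD_insert_self, PySem.Dict.insert_insert_self]
      rw [show d.getD ch 0 = 0 from PySem.Dict.getD_of_not_contains d 0 (by simpa using h)]
  rw [hstep, PySem.Dict.foldl_insert_getD_add_one_eq_counter]

-- pushing the branch under the insert (same function, insert-headed shape)
theorem pvIfInsert :
    (fun (h : PySem.Dict Char Int) (p : Char × Int) =>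
      if h.contains p.1 then h.insert p.1 (max (h.getD p.1 0) p.2) else h.insert p.1 p.2)
    = fun h p => h.insert p.1 (if h.contains p.1 then max (h.getD p.1 0) p.2 else p.2) := by
  funext h p
  by_cases hc : h.contains p.1 <;> simp [hc]

-- merging a list of pairs with distinct keys: effect on a single lookup
theorem pvMergeGetD (ps : List (Char × Int)) (hnd : (ps.map Prod.fst).Nodup)
    (d : PySem.Dict Char Int) (c : Char) :
    (ps.foldl (fun h p =>
      if h.contains p.1 then h.insert p.1 (max (h.getD p.1 0) p.2)
      else h.insert p.1 p.2) d).getD c 0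
    = match ps.find? (fun p => p.1 == c) with
      | some p => if d.contains c then max (d.getD c 0) p.2 else p.2
      | none => d.getD c 0 := by
  induction ps generalizing d with
  | nil => simp
  | cons p ps ih =>
    simp only [List.map_cons, List.nodup_cons] at hnd
    rw [List.foldl_cons, ih hnd.2]
    by_cases hc : p.1 = c
    · subst hc
      have hfind : ps.find? (fun q => q.1 == p.1) = none := by
        rw [List.find?_eq_none]
        intro q hq
        simp only [beq_iff_eq]
        intro he
        exact hnd.1 (he ▸ List.mem_map_of_mem hq)
      rw [hfind]
      simp only [List.find?_cons, beq_self_eq_true]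
      by_cases hcont : d.contains p.1
      · simp only [hcont, if_true]
        rw [PySem.Dict.getD_insert_self]
      · simp only [hcont, Bool.false_eq_true, if_false]
        rw [PySem.Dict.getD_insert_self]
    · have hne : c ≠ p.1 := fun h => hc h.symm
      have hstep : ∀ (v : Int),
          ((d.insert p.1 v).contains c) = d.contains c := by
        intro _
        rw [PySem.Dict.contains_insert]
        simp [hne]
      have hgd : ∀ (v : Int), (d.insert p.1 v).getD c 0 = d.getD c 0 := fun v =>
        PySem.Dict.getD_insert_of_ne d v 0 hne
      have hfc : List.find? (fun q => q.1 == c) (p :: ps)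
          = List.find? (fun q => q.1 == c) ps := by
        simp [beq_iff_eq, hc]
      rw [hfc]
      by_cases hcp : d.contains p.1 <;>
        simp only [hcp, Bool.false_eq_true, if_true, if_false] <;>
        cases hfind : ps.find? (fun q => q.1 == c) <;>
        simp only [hgd, hstep]

-- one word updates every lookup to the max with that word's count
theorem pvStepWord_getD (d : PySem.Dict Char Int) (w : String) (c : Char)
    (hnn : 0 ≤ d.getD c 0) :
    (pvStepWord d w).getD c 0 = max (d.getD c 0) ((w.toList.count c : Int)) := by
  unfold pvStepWord
  rw [pvHfw_eq_counter]
  dsimp only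
  rw [PySem.Dict.items_counter]
  rw [pvMergeGetD]
  · rw [List.find?_map]
    have hpred : ((fun p : Char × Int => p.1 == c) ∘ fun k => (k, (List.count k w.toList : Int)))
        = fun k => k == c := by funext k; simp
    rw [hpred]
    by_cases hm : c ∈ w.toList
    · have hmem : c ∈ PySem.Set.ofList w.toList := (PySem.Set.mem_ofList _ _).mpr hm
      have hsome : (List.find? (fun k => k == c) (PySem.Set.ofList w.toList)).isSome :=
        List.find?_isSome.mpr ⟨c, hmem, beq_self_eq_true c⟩
      obtain ⟨x, hx⟩ := Option.isSome_iff_exists.mp hsome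
      have hxc : x = c := by simpa using List.find?_some hx
      rw [hxc] at hx
      rw [hx]
      simp only [Option.map_some]
      by_cases hcont : d.contains c
      · simp [hcont]
      · simp only [hcont, Bool.false_eq_true, if_false]
        rw [PySem.Dict.getD_of_not_contains d 0 (by simpa using hcont)]
        have h0 : (0:Int) ≤ (w.toList.count c : Int) := Int.natCast_nonneg _
        omega
    · have hfind : (PySem.Set.ofList w.toList).find? (fun k => k == c) = none := by
        rw [List.find?_eq_none]
        intro k hk
        simp only [beq_iff_eq]
        intro he
        exact hm (he ▸ (PySem.Set.mem_ofList _ _).mp hk)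
      rw [hfind]
      simp only [Option.map_none]
      rw [List.count_eq_zero_of_not_mem hm]
      omega
  · rw [List.map_map]
    have hid : (Prod.fst ∘ fun k : Char => (k, (List.count k w.toList : Int))) = id := by
      funext k; rfl
    rw [hid, List.map_id]
    exact PySem.Set.nodup_ofList w.toList

theorem pvStepWord_keys (d : PySem.Dict Char Int) (w : String) :
    (pvStepWord d w).keys = PySem.Set.update d.keys w.toList := by
  unfold pvStepWord
  rw [pvHfw_eq_counter]
  dsimp only
  rw [PySem.Dict.items_counter, pvIfInsert]
  rw [PySem.Dict.keys_foldl_insert_key _ Prod.fst]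
  rw [List.map_map]
  have hid : (Prod.fst ∘ fun k : Char => (k, (List.count k w.toList : Int))) = id := by
    funext k; rfl
  rw [hid, List.map_id]
  rw [PySem.Set.update_eq_append_filter d.keys (PySem.Set.ofList w.toList),
    PySem.Set.ofList_ofList, ← PySem.Set.update_eq_append_filter]

theorem pvStepWord_nodup (d : PySem.Dict Char Int) (w : String)
    (h : d.keys.Nodup) : (pvStepWord d w).keys.Nodup := by
  unfold pvStepWord
  rw [pvHfw_eq_counter]
  dsimp only
  rw [PySem.Dict.items_counter, pvIfInsert]
  exact PySem.Dict.nodup_keys_foldl_insert_key _ Prod.fst _ d h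

-- the whole word loop of A, lookup by lookup
theorem pvFold_getD (arr : List String) : ∀ (d : PySem.Dict Char Int) (c : Char),
    0 ≤ d.getD c 0 →
    (arr.foldl pvStepWord d).getD c 0
      = arr.foldl (fun m w => max m ((w.toList.count c : Int))) (d.getD c 0) := by
  induction arr with
  | nil => intro d c _; simp
  | cons w arr ih =>
    intro d c h
    rw [List.foldl_cons, List.foldl_cons]
    have hnn : 0 ≤ (pvStepWord d w).getD c 0 := by
      rw [pvStepWord_getD d w c h]
      exact le_max_of_le_left h
    rw [ih _ c hnn, pvStepWord_getD d w c h]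

theorem pvFold_keys (arr : List String) : ∀ (d : PySem.Dict Char Int),
    (arr.foldl pvStepWord d).keys
      = arr.foldl (fun s w => PySem.Set.update s w.toList) d.keys := by
  induction arr with
  | nil => intro d; simp
  | cons w arr ih =>
    intro d
    rw [List.foldl_cons, List.foldl_cons, ih, pvStepWord_keys]

theorem pvFold_nodup (arr : List String) : ∀ (d : PySem.Dict Char Int),
    d.keys.Nodup → (arr.foldl pvStepWord d).keys.Nodup := by
  induction arr with
  | nil => intro d h; simpa using h
  | cons w arr ih =>
    intro d h
    rw [List.foldl_cons]
    exact ih _ (pvStepWord_nodup d w h)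

-- B's seen/order loop over one word keeps both components equal to the running set
theorem pvInnerB (l : List Char) (s : PySem.Set Char) :
    l.foldl (fun (st : PySem.Set Char × List Char) ch =>
      if ch ∈ st.1 then st else (PySem.Set.add st.1 ch, st.2 ++ [ch])) (s, s)
    = (PySem.Set.update s l, PySem.Set.update s l) := by
  induction l generalizing s with
  | nil => rw [List.foldl_nil, PySem.Set.update_nil]
  | cons ch l ih =>
    rw [List.foldl_cons, PySem.Set.update_cons]
    by_cases h : ch ∈ s
    · simp only [h, if_true]
      rw [PySem.Set.add_of_mem h]
      exact ih s
    · simp only [h, if_false]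
      rw [PySem.Set.add_of_not_mem h]
      exact ih (s ++ [ch])

-- and over the whole word list
theorem pvOrderFold (arr : List String) : ∀ (s : PySem.Set Char),
    arr.foldl (fun st word =>
      word.toList.foldl (fun (st : PySem.Set Char × List Char) ch =>
        if ch ∈ st.1 then st else (PySem.Set.add st.1 ch, st.2 ++ [ch])) st) (s, s)
    = (arr.foldl (fun s w => PySem.Set.update s w.toList) s,
       arr.foldl (fun s w => PySem.Set.update s w.toList) s) := by
  induction arr with
  | nil => intro s; simp
  | cons w arr ih =>
    intro s
    rw [List.foldl_cons, List.foldl_cons, pvInnerB]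
    exact ih _

theorem pvOrderFold0 (arr : List String) :
    arr.foldl (fun st word =>
      word.toList.foldl (fun (st : PySem.Set Char × List Char) ch =>
        if ch ∈ st.1 then st else (PySem.Set.add st.1 ch, st.2 ++ [ch])) st)
      ((PySem.Set.empty : PySem.Set Char), ([] : List Char))
    = (arr.foldl (fun s w => PySem.Set.update s w.toList) PySem.Set.empty,
       arr.foldl (fun s w => PySem.Set.update s w.toList) PySem.Set.empty) :=
  pvOrderFold arr PySem.Set.empty

-- appending a constant once per range element is list repetition
theorem pvRepeatFold (n : Int) (x : String) (r : List String) :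
    (PySem.List.pyRange 0 n 1).foldl (fun r _ => r ++ [x]) r
    = r ++ PySem.List.pyRepeat [x] n := by
  have gen : ∀ (l : List Int) (r : List String),
      l.foldl (fun r _ => r ++ [x]) r = r ++ List.replicate l.length x := by
    intro l
    induction l with
    | nil => intro r; simp
    | cons a l ih =>
      intro r
      rw [List.foldl_cons, ih, List.length_cons]
      simp [List.replicate_succ]
  rw [gen, PySem.List.pyRepeat_singleton, PySem.List.length_pyRange_one]
  norm_num

-- ===== VERDICT (by name: the statement is the Claim_ definition above) =====
theorem min_chars_for_words_spec : Claim_equal_min_chars_for_words := by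
  intro array _
  unfold Spec_min_chars_for_words min_chars_for_words min_chars_for_words_alt
  dsimp only
  -- A's word loop is a fold of pvStepWord
  have hAF : (array.foldl (fun hash word =>
      let hash_for_word := word.toList.foldl (fun d ch =>
        let d := if d.contains ch then d else d.insert ch 0
        d.insert ch (d.getD ch 0 + 1)) (PySem.Dict.empty : PySem.Dict Char Int)
      hash_for_word.items.foldl (fun h p =>
        if h.contains p.1 then h.insert p.1 (max (h.getD p.1 0) p.2)
        else h.insert p.1 p.2) hash) (PySem.Dict.empty : PySem.Dict Char Int))
      = array.foldl pvStepWord PySem.Dict.empty := rfl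
  rw [hAF]
  set F := array.foldl pvStepWord PySem.Dict.empty with hF
  have hnd : F.keys.Nodup := pvFold_nodup array _ (by simp)
  -- B's order list is exactly F's key list
  rw [pvOrderFold0 array]
  have hkeys : F.keys = array.foldl (fun s w => PySem.Set.update s w.toList) PySem.Set.empty := by
    rw [hF, pvFold_keys]
    rfl
  -- A's items are keys paired with their lookups
  rw [PySem.Dict.items_eq_map_keys F hnd 0, List.foldl_map]
  rw [← hkeys]
  apply List.foldl_ext
  intro r k _
  dsimp only
  rw [pvRepeatFold]
  have hg : F.getD k 0 = array.foldl (fun m w => max m ((w.toList.count k : Int))) 0 := by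
    rw [hF, pvFold_getD array _ k (by simp)]
    simp
  rw [hg]
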